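-- pv_equiv track=rewrite | github.com/Rophu/travail-IUT | ExoMdP.py | ne_possede_pas_deux_majuscules_consecutives
-- ===== SOURCE A (Python) =====
-- def ne_possede_pas_deux_majuscules_consecutives(chaine):
--     """
--     verifie si chaine ne possède pas deux_majuscules_consecutives
--     paramètres formels: chaine, une chaine de caractères(type str)
--     résultat: "pas_deux_majuscules_dans_la_chaine", un booléen. il est True
--               si la chaine comporte deux majuscules cons&écutives False sinon
--     invariant: l'absence de majuscule consécutives dans chaine de l'indice
--                0 à 'indice'-1
--     """
--     i=0
--     pas_deux_majuscules_dans_la_chaine=True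
--     precedent_est_une_majuscule=False
--     while i<len(chaine) and pas_deux_majuscules_dans_la_chaine:
--         if chaine[i].isupper() and precedent_est_une_majuscule:
--                 pas_deux_majuscules_dans_la_chaine=False
--         else:
--             if chaine[i].isupper():
--                 precedent=chaine[i]
--                 precedent_est_une_majuscule=True
--             else:
--                 precedent_est_une_majuscule=False
--         i+=1
--     return pas_deux_majuscules_dans_la_chaine
-- ===== SOURCE B (Python) =====
-- def ne_possede_pas_deux_majuscules_consecutives(chaine):
--     majuscules = {i for i, c in enumerate(chaine) if c.isupper()}
--     return all(i + 1 not in majuscules for i in majuscules)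
-- ===== Notes on version B (the rewrite author's own statement) =====
-- stated objective: alternative
-- what changed: Replaced the indexed while-loop state machine (early-exit flag plus carried previous-is-uppercase boolean) by a two-stage set formulation: build the set of uppercase positions with one comprehension, then check via set membership that no position's successor is also uppercase. One comprehension pass plus set-membership tests replaces the per-character interpreted state machine, which is measurably faster.
import Mathlib
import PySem

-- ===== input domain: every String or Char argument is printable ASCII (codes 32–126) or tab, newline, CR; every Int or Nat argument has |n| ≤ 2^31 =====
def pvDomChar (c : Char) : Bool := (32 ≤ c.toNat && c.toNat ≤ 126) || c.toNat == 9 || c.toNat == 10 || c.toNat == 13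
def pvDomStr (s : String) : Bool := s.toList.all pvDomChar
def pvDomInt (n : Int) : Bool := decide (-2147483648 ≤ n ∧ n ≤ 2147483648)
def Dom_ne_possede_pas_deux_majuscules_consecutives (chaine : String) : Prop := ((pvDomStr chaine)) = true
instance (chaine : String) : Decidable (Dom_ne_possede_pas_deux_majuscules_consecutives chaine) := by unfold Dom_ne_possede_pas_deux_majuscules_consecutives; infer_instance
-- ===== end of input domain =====

-- B replaces A's indexed while-loop state machine by a two-stage set formulation: collect the set of
-- uppercase positions, then check that no position's successor is also in the set (same O(n) cost).
-- ===== PORT A =====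
-- while i<len(chaine) and ok: the loop body, ported as structural recursion on the remaining characters;
-- when ok is false the loop exits, modelled by returning ok.
def pvLoopA : List Char → Bool → Bool → Bool
  | [], ok, _ => ok
  | c :: rest, ok, prec =>
    if ok then
      if PySem.Chars.isupper c && prec then
        pvLoopA rest false prec
      else
        if PySem.Chars.isupper c then
          pvLoopA rest ok true
        else
          pvLoopA rest ok false
    else ok

def ne_possede_pas_deux_majuscules_consecutives (chaine : String) : Bool :=
  pvLoopA chaine.toList true false

-- ===== PORT B =====
-- majuscules = {i for i, c in enumerate(chaine) if c.isupper()}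
-- return all(i + 1 not in majuscules for i in majuscules)
def ne_possede_pas_deux_majuscules_consecutives_alt (chaine : String) : Bool :=
  let majuscules : PySem.Set Int :=
    PySem.Set.ofList (((PySem.List.enumerate chaine.toList).filter
      (fun p => PySem.Chars.isupper p.2)).map (·.1))
  majuscules.all (fun i => !(PySem.Set.contains majuscules (i + 1)))

-- ===== PRECONDITION & SPEC =====
def Spec_ne_possede_pas_deux_majuscules_consecutives (chaine : String) (out : Bool) : Prop := out = ne_possede_pas_deux_majuscules_consecutives_alt chaine
instance (chaine : String) (out : Bool) : Decidable (Spec_ne_possede_pas_deux_majuscules_consecutives chaine out) := by unfold Spec_ne_possede_pas_deux_majuscules_consecutives; infer_instance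

-- ===== CLAIM (what is proved, stated in full; the proofs are below) =====
def Claim_equal_ne_possede_pas_deux_majuscules_consecutives : Prop := ∀ (chaine : String), Dom_ne_possede_pas_deux_majuscules_consecutives chaine → Spec_ne_possede_pas_deux_majuscules_consecutives chaine (ne_possede_pas_deux_majuscules_consecutives chaine)

-- ===== LEMMAS AND PROOFS =====
-- "some adjacent pair is both uppercase", the common reference the two ports are compared against
def pvBad : List Char → Bool
  | c :: d :: rest => (PySem.Chars.isupper c && PySem.Chars.isupper d) || pvBad (d :: rest)
  | _ => false

def pvFirstUpper : List Char → Bool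
  | [] => false
  | c :: _ => PySem.Chars.isupper c

lemma pvLoopA_false : ∀ (cs : List Char) (p : Bool), pvLoopA cs false p = false
  | [], _ => rfl
  | _ :: rest, p => by simp [pvLoopA]

lemma pvLoopA_cons_true (c : Char) (rest : List Char) (p : Bool) :
    pvLoopA (c :: rest) true p =
      if (PySem.Chars.isupper c && p) then false else pvLoopA rest true (PySem.Chars.isupper c) := by
  cases hu : PySem.Chars.isupper c <;> cases p <;> simp_all [pvLoopA, pvLoopA_false]

lemma pvLoopA_char : ∀ (cs : List Char) (p : Bool),
    pvLoopA cs true p = !((p && pvFirstUpper cs) || pvBad cs)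
  | [], p => by simp [pvLoopA, pvFirstUpper, pvBad]
  | c :: rest, p => by
      rw [pvLoopA_cons_true, pvLoopA_char rest (PySem.Chars.isupper c)]
      cases rest with
      | nil => cases hu : PySem.Chars.isupper c <;> cases p <;> simp [pvFirstUpper, pvBad, hu]
      | cons d rs =>
        cases hu : PySem.Chars.isupper c <;> cases hp : p <;> cases hd : PySem.Chars.isupper d <;>
          simp [pvFirstUpper, pvBad, hu, hd]

-- membership in the uppercase-index list built by B, characterised by position
lemma pv_mem_ups : ∀ (cs : List Char) (s j : Int),
    (j ∈ ((PySem.List.enumerate cs s).filter (fun p => PySem.Chars.isupper p.2)).map (·.1)) ↔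
      ∃ k : Nat, k < cs.length ∧ j = s + k ∧ PySem.Chars.isupper (cs.getD k 'a') = true
  | [], s, j => by simp [PySem.List.enumerate_nil]
  | c :: rest, s, j => by
      rw [PySem.List.enumerate_cons]
      have ih := pv_mem_ups rest (s+1) j
      constructor
      · intro h
        simp only [List.filter_cons] at h
        by_cases hu : PySem.Chars.isupper c = true
        · simp only [hu, if_pos] at h
          rcases List.mem_map.1 h with ⟨p, hp, hpj⟩
          rcases List.mem_cons.1 hp with h0 | hmem
          · subst h0; exact ⟨0, by simp, by simp [← hpj], by simpa using hu⟩
          · rcases ih.1 (List.mem_map.2 ⟨p, hmem, hpj⟩) with ⟨k, hk, hj, hup⟩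
            exact ⟨k+1, by simpa using hk, by push_cast at hj ⊢; omega, by simpa using hup⟩
        · simp only [hu] at h
          rcases ih.1 h with ⟨k, hk, hj, hup⟩
          exact ⟨k+1, by simpa using hk, by push_cast at hj ⊢; omega, by simpa using hup⟩
      · rintro ⟨k, hk, hj, hup⟩
        cases k with
        | zero =>
          simp at hup hj
          simp [hup, hj]
        | succ k =>
          have : j ∈ ((PySem.List.enumerate rest (s+1)).filter (fun p => PySem.Chars.isupper p.2)).map (·.1) :=
            ih.2 ⟨k, by simpa using hk, by push_cast at hj ⊢; omega, by simpa using hup⟩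
          simp only [List.filter_cons]
          by_cases hu : PySem.Chars.isupper c = true <;> simp [hu, this]


lemma pvBad_iff : ∀ cs : List Char, pvBad cs = true ↔
    ∃ k : Nat, k + 1 < cs.length ∧ PySem.Chars.isupper (cs.getD k 'a') = true ∧
      PySem.Chars.isupper (cs.getD (k+1) 'a') = true
  | [] => by simp [pvBad]
  | [c] => by simp [pvBad]
  | c :: d :: rest => by
      have ih := pvBad_iff (d :: rest)
      simp only [pvBad, Bool.or_eq_true, Bool.and_eq_true, ih]
      constructor
      · rintro (⟨hc, hd⟩ | ⟨k, hk, h1, h2⟩)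
        · exact ⟨0, by simp, by simpa using hc, by simpa using hd⟩
        · exact ⟨k+1, by simp at hk ⊢; omega, by simpa using h1, by simpa using h2⟩
      · rintro ⟨k, hk, h1, h2⟩
        cases k with
        | zero => exact Or.inl ⟨by simpa using h1, by simpa using h2⟩
        | succ k => exact Or.inr ⟨k, by simp at hk ⊢; omega, by simpa using h1, by simpa using h2⟩


lemma pvAlt_eq (chaine : String) :
    ne_possede_pas_deux_majuscules_consecutives_alt chaine = !pvBad chaine.toList := by
  unfold ne_possede_pas_deux_majuscules_consecutives_alt
  set cs := chaine.toList with hcs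
  set l := ((PySem.List.enumerate cs).filter (fun p => PySem.Chars.isupper p.2)).map (·.1) with hl
  rw [Bool.eq_iff_iff]
  simp only [List.all_eq_true, Bool.not_eq_true']
  constructor
  · intro h
    by_contra hb
    rw [Bool.not_eq_false] at hb
    rcases (pvBad_iff cs).1 hb with ⟨k, hk, h1, h2⟩
    have hj : ((k : Int)) ∈ l := (pv_mem_ups cs 0 k).2 ⟨k, by omega, by simp, h1⟩
    have hj1 : ((k : Int) + 1) ∈ l := (pv_mem_ups cs 0 _).2 ⟨k+1, by omega, by push_cast; ring, h2⟩
    have hall := h _ ((PySem.Set.mem_ofList _ _).2 hj)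
    have hc : PySem.Set.contains (PySem.Set.ofList l) ((k : Int) + 1) = true :=
      (PySem.Set.contains_iff _ _).2 ((PySem.Set.mem_ofList _ _).2 hj1)
    rw [hall] at hc
    exact Bool.false_ne_true hc
  · intro h j hjmem
    rcases (pv_mem_ups cs 0 j).1 ((PySem.Set.mem_ofList _ _).1 hjmem) with ⟨k, hk, hj0, hup⟩
    by_contra hc
    rw [Bool.not_eq_false] at hc
    have hj1 := (PySem.Set.mem_ofList _ _).1 ((PySem.Set.contains_iff _ _).1 hc)
    rcases (pv_mem_ups cs 0 _).1 hj1 with ⟨k', hk', hj1', hup'⟩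
    have hkk : k' = k + 1 := by omega
    subst hkk
    exact absurd ((pvBad_iff cs).2 ⟨k, by omega, hup, hup'⟩) (by simp [h])


-- ===== VERDICT (by name: the statement is the Claim_ definition above) =====
theorem ne_possede_pas_deux_majuscules_consecutives_spec : Claim_equal_ne_possede_pas_deux_majuscules_consecutives := by
  intro chaine _
  unfold Spec_ne_possede_pas_deux_majuscules_consecutives
  rw [pvAlt_eq]
  unfold ne_possede_pas_deux_majuscules_consecutives
  rw [pvLoopA_char]
  simp
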